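-- pv_equiv track=rewrite | github.com/daniel-reich/ubiquitous-fiesta | HSKvp4qYA2AhDWxn6_24.py | total_points
-- ===== SOURCE A (Python) =====
-- def total_points(guesses, word):
--     result = []
--     for i in guesses:
--         outcome = all([i.count(i[n]) <= word.count(i[n]) for n in range(len(i))])
--         if outcome == True:
--             if len(i) < 6:
--                 result.append(len(i) - 2)
--             elif len(i) >= 6:
--                 result.append(54)
--         else:
--             result.append(0)
--     return sum(result)
-- ===== SOURCE B (Python) =====
-- def total_points(guesses, word):
--     w = sorted(word)
--     total = 0
--     for g in guesses:
--         j = 0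
--         ok = True
--         for ch in sorted(g):
--             while j < len(w) and w[j] != ch:
--                 j += 1
--             if j == len(w):
--                 ok = False
--                 break
--             j += 1
--         if ok:
--             total += 54 if len(g) >= 6 else len(g) - 2
--     return total
-- ===== Notes on version B (the rewrite author's own statement) =====
-- stated objective: alternative
-- what changed: Instead of A's per-position repeated .count scans over guess and word, B sorts the word once and each guess once, then decides sub-multiset containment by a single two-pointer greedy merge over the two sorted sequences, accumulating the score into a running total rather than a result list.
import Mathlib
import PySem

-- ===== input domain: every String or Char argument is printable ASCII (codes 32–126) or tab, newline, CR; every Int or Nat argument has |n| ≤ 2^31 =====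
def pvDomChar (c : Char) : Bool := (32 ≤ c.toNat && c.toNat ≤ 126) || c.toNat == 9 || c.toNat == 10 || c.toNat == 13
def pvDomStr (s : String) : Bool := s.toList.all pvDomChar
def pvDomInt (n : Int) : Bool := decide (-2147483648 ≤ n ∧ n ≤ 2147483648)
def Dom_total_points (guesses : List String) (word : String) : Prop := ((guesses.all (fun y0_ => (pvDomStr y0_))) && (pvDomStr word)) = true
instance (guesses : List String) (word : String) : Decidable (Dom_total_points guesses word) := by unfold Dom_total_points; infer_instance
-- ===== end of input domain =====

-- One line: B sorts the word and each guess and decides containment by a two-pointer merge instead of A's repeated .count scans (alternative algorithm; return value only, no mutation).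

-- ===== PORT A =====
def tpStepA (wl : List Char) (res : List Int) (i : String) : List Int :=
  let l := i.toList
  -- n ranges over range(len(i)), so l.getD n ' ' is exactly i[n] (always in range)
  let outcome := (List.range l.length).all (fun n => l.count (l.getD n ' ') ≤ wl.count (l.getD n ' '))
  if outcome = true then
    if l.length < 6 then res ++ [(l.length : Int) - 2]
    else if 6 ≤ l.length then res ++ [54]
    else res
  else res ++ [0]

def total_points (guesses : List String) (word : String) : Int :=
  (guesses.foldl (tpStepA word.toList) []).sum

-- ===== PORT B =====
-- the inner 'for ch in sorted(g): while j < len(w) and w[j] != ch: j += 1 …' loop of Source B: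
-- gs are the remaining guess chars, ws is the word suffix from the current pointer j
def tpMerge : List Char → List Char → Bool
  | [], _ => true
  | _ :: _, [] => false          -- j reached len(w): ok = False
  | c :: gs, d :: ws => if d ≠ c then tpMerge (c :: gs) ws else tpMerge gs ws

def tpStepB (w : List Char) (total : Int) (g : String) : Int :=
  if tpMerge (PySem.List.sorted g.toList (fun x => x) false) w then
    total + (if 6 ≤ g.toList.length then 54 else (g.toList.length : Int) - 2)
  else total

def total_points_alt (guesses : List String) (word : String) : Int :=
  guesses.foldl (tpStepB (PySem.List.sorted word.toList (fun x => x) false)) 0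

-- ===== PRECONDITION & SPEC =====
def Spec_total_points (guesses : List String) (word : String) (out : Int) : Prop := out = total_points_alt guesses word
instance (guesses : List String) (word : String) (out : Int) : Decidable (Spec_total_points guesses word out) := by unfold Spec_total_points; infer_instance

-- ===== CLAIM (what is proved, stated in full; the proofs are below) =====
def Claim_equal_total_points : Prop := ∀ (guesses : List String) (word : String), Dom_total_points guesses word → Spec_total_points guesses word (total_points guesses word)

-- ===== LEMMAS AND PROOFS =====

-- the greedy two-pointer merge is the standard greedy subsequence test
theorem tpMerge_eq_isSublist : ∀ (gs ws : List Char), tpMerge gs ws = gs.isSublist ws := by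
  intro gs ws
  induction ws generalizing gs with
  | nil => cases gs <;> simp [tpMerge, List.isSublist]
  | cons d ws ih =>
    cases gs with
    | nil => simp [tpMerge, List.isSublist]
    | cons c gs =>
      rcases eq_or_ne d c with h | h
      · subst h; simp [tpMerge, List.isSublist, ih]
      · simp [tpMerge, List.isSublist, h, h.symm, ih]

-- on sorted lists the greedy subsequence test decides sub-multiset containment,
-- which is exactly A's per-position count test
theorem tp_outcome_eq (l w : List Char) :
    ((List.range l.length).all (fun n => l.count (l.getD n ' ') ≤ w.count (l.getD n ' ')))
    = tpMerge (PySem.List.sorted l (fun x => x) false)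
        (PySem.List.sorted w (fun x => x) false) := by
  rw [tpMerge_eq_isSublist, Bool.eq_iff_iff, List.isSublist_iff_sublist]
  have hsub : List.Sublist (PySem.List.sorted l (fun x => x) false)
      (PySem.List.sorted w (fun x => x) false) ↔ List.Subperm l w := by
    constructor
    · intro h
      exact ((PySem.List.sorted_perm l _ false).symm.subperm.trans h.subperm).trans
        (PySem.List.sorted_perm w _ false).subperm
    · intro h
      exact List.sublist_of_subperm_of_pairwise
        (((PySem.List.sorted_perm l _ false).subperm.trans h).trans
          (PySem.List.sorted_perm w _ false).symm.subperm)
        (PySem.List.sorted_pairwise l _) (PySem.List.sorted_pairwise w _)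
  rw [hsub, List.subperm_ext_iff]
  simp only [List.all_eq_true, List.mem_range, decide_eq_true_eq]
  constructor
  · intro h c hc
    obtain ⟨n, hn, rfl⟩ := List.mem_iff_getElem.mp hc
    have := h n hn
    rwa [List.getD_eq_getElem l ' ' hn] at this
  · intro h n hn
    rw [List.getD_eq_getElem l ' ' hn]
    exact h _ (List.getElem_mem hn)

-- the amount each guess contributes is the same on both sides
theorem tp_step_sum (w : String) (res : List Int) (t : Int) (g : String)
    (h : res.sum = t) :
    (tpStepA w.toList res g).sum
      = tpStepB (PySem.List.sorted w.toList (fun x => x) false) t g := by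
  unfold tpStepA tpStepB
  simp only [tp_outcome_eq g.toList w.toList]
  split_ifs with h1 h2 h3 h4
  all_goals simp_all [List.sum_append]
  all_goals omega

theorem tp_fold_eq (w : String) (gs : List String) (res : List Int) (t : Int)
    (h : res.sum = t) :
    (gs.foldl (tpStepA w.toList) res).sum
      = gs.foldl (tpStepB (PySem.List.sorted w.toList (fun x => x) false)) t := by
  induction gs generalizing res t with
  | nil => simpa using h
  | cons g gs ih => exact ih _ _ (tp_step_sum w res t g h)

-- ===== VERDICT (by name: the statement is the Claim_ definition above) =====
theorem total_points_spec : Claim_equal_total_points := by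
  intro guesses word _
  show _ = _
  exact tp_fold_eq word guesses [] 0 rfl
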